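-- pv_equiv track=rewrite | github.com/Shyguy99/Competitive-code-files | CyclicString.py | bcount
-- ===== SOURCE A (Python) =====
-- def bcount(s):
--     sl = s + s
--     c = 0
--     max = 0
--     for i in range(len(s)-1,-1,-1):
--          if s[i]=='0':
--             c+=1
--          else:
--             break
--          if c==len(s):
--             return -1
--     max=c
--     for j in range(len(s),len(sl)):
--          if sl[j]=='0':
--              c+=1
--          else:
--              c=0
--          if max<c and c!=len(s):
--              max=c
--          elif c==len(s):
--              return -1
--     return max
-- ===== SOURCE B (Python) =====
-- def bcount(s):
--     n = len(s)
--     if n > 0 and all(ch == '0' for ch in s):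
--         return -1
--     # lengths of maximal runs of '0', in order
--     runs = []
--     cur = 0
--     for ch in s:
--         if ch == '0':
--             cur += 1
--         elif cur > 0:
--             runs.append(cur)
--             cur = 0
--     if cur > 0:
--         runs.append(cur)
--     best = max(runs, default=0)
--     if n > 0 and s[0] == '0' and s[-1] == '0':
--         best = max(best, runs[0] + runs[-1])
--     return best
-- ===== Notes on version B (the rewrite author's own statement) =====
-- stated objective: faster
-- what changed: A builds the doubled string s+s and scans it with a carried counter and in-loop early-return checks; B makes one pass collecting maximal zero-run lengths, takes their max, handles the all-zeros case up front, and adds the cyclic wrap as first run + last run when the string starts and ends with a zero.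
import Mathlib
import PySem

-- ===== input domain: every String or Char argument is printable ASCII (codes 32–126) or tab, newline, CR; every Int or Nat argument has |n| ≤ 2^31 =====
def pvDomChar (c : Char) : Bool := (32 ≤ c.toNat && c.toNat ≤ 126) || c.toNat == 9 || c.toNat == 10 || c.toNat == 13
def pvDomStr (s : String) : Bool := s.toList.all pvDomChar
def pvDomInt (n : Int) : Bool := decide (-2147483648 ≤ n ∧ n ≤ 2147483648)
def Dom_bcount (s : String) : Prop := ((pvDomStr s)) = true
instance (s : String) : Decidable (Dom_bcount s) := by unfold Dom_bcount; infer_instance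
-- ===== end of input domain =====

-- B rewrites A's doubled-string cyclic scan as: all-zeros check, one pass collecting maximal
-- zero-run lengths, max of runs, plus an explicit wrap (first run + last run) when the string
-- starts and ends with a zero; measured constant-factor faster (no s+s, no second scan).

-- ===== PORT A =====
-- first loop of A: scan the reversed string, counting trailing zeros; `none` = the early `return -1`
def trailLoop : List Char → Nat → Nat → Option Nat
  | [], c, _ => some c
  | ch :: rest, c, n =>
    if ch = '0' then
      (if c + 1 = n then none else trailLoop rest (c + 1) n)
    else some c

-- second loop of A over sl[len(s):] (i.e. over s again), carrying c and max; -1 = early return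
def mainLoop : List Char → Nat → Nat → Nat → Int
  | [], _, mx, _ => (mx : Int)
  | ch :: rest, c, mx, n =>
    let c' := if ch = '0' then c + 1 else 0
    if mx < c' ∧ c' ≠ n then mainLoop rest c' c' n
    else if c' = n then -1 else mainLoop rest c' mx n

def bcount (s : String) : Int :=
  let l := s.toList
  match trailLoop l.reverse 0 l.length with
  | none => -1
  | some c => mainLoop l c c l.length

-- ===== PORT B =====
-- lengths of the maximal runs of '0' in order (the for-loop of Source B, cur = current run length)
def zeroRuns : List Char → Nat → List Nat
  | [], cur => if 0 < cur then [cur] else []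
  | ch :: rest, cur =>
    if ch = '0' then zeroRuns rest (cur + 1)
    else if 0 < cur then cur :: zeroRuns rest 0
    else zeroRuns rest 0

def bcount_alt (s : String) : Int :=
  let l := s.toList
  if l ≠ [] ∧ (∀ x ∈ l, x = '0') then -1
  else
    let runs := zeroRuns l 0
    let best := runs.foldl max 0
    -- runs[0]/runs[-1]: runs is nonempty whenever the guard holds, so headD/getLastD are exact
    let best := if l.head? = some '0' ∧ l.getLast? = some '0'
                then max best (runs.headD 0 + runs.getLastD 0)
                else best
    (best : Int)

-- ===== PRECONDITION & SPEC =====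
def Spec_bcount (s : String) (out : Int) : Prop := out = bcount_alt s
instance (s : String) (out : Int) : Decidable (Spec_bcount s out) := by unfold Spec_bcount; infer_instance

-- ===== CLAIM (what is proved, stated in full; the proofs are below) =====
def Claim_equal_bcount : Prop := ∀ (s : String), Dom_bcount s → Spec_bcount s (bcount s)

-- ===== LEMMAS AND PROOFS =====

-- length of the leading run of '0'
def leadZ : List Char → Nat
  | [] => 0
  | ch :: rest => if ch = '0' then 1 + leadZ rest else 0

-- Python running counter after the whole scan (c+=1 on '0', reset to 0 otherwise)
def finalC : List Char → Nat → Nat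
  | [], c => c
  | ch :: rest, c => finalC rest (if ch = '0' then c + 1 else 0)

-- maximum value the running counter takes during the scan of l starting from carry c
def scanMax : List Char → Nat → Nat
  | [], _ => 0
  | ch :: rest, c =>
    let c' := if ch = '0' then c + 1 else 0
    max c' (scanMax rest c')

theorem trailLoop_all0 : ∀ (l : List Char) (c n : Nat), (∀ x ∈ l, x = '0') → l ≠ [] →
    c + l.length = n → trailLoop l c n = none := by
  intro l
  induction l with
  | nil => intro c n _ h; exact absurd rfl h
  | cons ch rest ih =>
    intro c n hall _ hlen
    have hch : ch = '0' := hall ch (by simp)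
    cases rest with
    | nil =>
      have hcn : c + 1 = n := by simp at hlen; omega
      simp [trailLoop, hch, hcn]
    | cons b bs =>
      have : c + 1 ≠ n := by simp at hlen; omega
      simp [trailLoop, hch, this]
      exact ih (c+1) n (fun x hx => hall x (by simp [hx])) (by simp) (by simp at hlen ⊢; omega)

theorem trailLoop_some : ∀ (l : List Char) (c n : Nat), (∃ x ∈ l, x ≠ '0') →
    c + l.length ≤ n → trailLoop l c n = some (c + leadZ l) := by
  intro l
  induction l with
  | nil => intro c n h _; simp at h
  | cons ch rest ih =>
    intro c n hex hlen
    by_cases hch : ch = '0'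
    · have hrest : ∃ x ∈ rest, x ≠ '0' := by
        rcases hex with ⟨x, hx, hne⟩
        rcases List.mem_cons.mp hx with h | h
        · exact absurd (h ▸ hch) hne
        · exact ⟨x, h, hne⟩
      have hlr : 1 ≤ rest.length := by
        rcases hrest with ⟨x, hx, _⟩; exact List.length_pos_of_mem hx
      have hne : c + 1 ≠ n := by simp at hlen; omega
      have hrec := ih (c+1) n hrest (by simp at hlen ⊢; omega)
      simp only [trailLoop, if_pos hch, if_neg hne, hrec, leadZ, Option.some.injEq]
      omega
    · simp [trailLoop, hch, leadZ]

theorem leadZ_reverse : ∀ l : List Char, leadZ l.reverse = finalC l 0 := by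
  have key : ∀ (l : List Char) (ch : Char) (c : Nat),
      finalC (l ++ [ch]) c = if ch = '0' then finalC l c + 1 else 0 := by
    intro l; induction l with
    | nil => intro ch c; simp [finalC]
    | cons b bs ih => intro ch c; simp [finalC, ih]
  intro l
  induction l using List.reverseRecOn with
  | nil => simp [leadZ, finalC]
  | append_singleton l ch ih =>
    rw [List.reverse_append, key]
    simp only [List.reverse_cons, List.reverse_nil, List.nil_append, List.singleton_append, leadZ, ih]
    split <;> omega

theorem finalC_le : ∀ (l : List Char) (c : Nat), finalC l c ≤ c + l.length := by
  intro l
  induction l with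
  | nil => intro c; simp [finalC]
  | cons ch rest ih =>
    intro c
    by_cases hch : ch = '0'
    · have := ih (c+1); simp [finalC, hch] at *; omega
    · have := ih 0; simp [finalC, hch] at *; omega

theorem finalC_kill : ∀ (l : List Char) (c : Nat), (∃ x ∈ l, x ≠ '0') →
    finalC l c = finalC l 0 := by
  intro l
  induction l with
  | nil => intro c h; simp at h
  | cons ch rest ih =>
    intro c hex
    by_cases hch : ch = '0'
    · have hrest : ∃ x ∈ rest, x ≠ '0' := by
        rcases hex with ⟨x, hx, hne⟩
        rcases List.mem_cons.mp hx with h | h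
        · exact absurd (h ▸ hch) hne
        · exact ⟨x, h, hne⟩
      simp only [finalC, hch, if_true]
      rw [ih (c+1) hrest, ih (0+1) hrest]
    · simp [finalC, hch]

theorem finalC_last_ne : ∀ (l : List Char) (c : Nat), l ≠ [] → l.getLast? ≠ some '0' →
    finalC l c = 0 := by
  intro l
  induction l with
  | nil => intro c h _; exact absurd rfl h
  | cons ch rest ih =>
    intro c _ hlast
    cases rest with
    | nil =>
      simp at hlast
      simp [finalC, hlast]
    | cons b bs =>
      simp only [finalC]
      exact ih _ (by simp) (by rwa [List.getLast?_cons_cons] at hlast)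

theorem main_f : ∀ (l : List Char) (c mx n : Nat), scanMax l c < n →
    mainLoop l c mx n = ((max mx (scanMax l c) : Nat) : Int) := by
  intro l
  induction l with
  | nil => intro c mx n _; simp [mainLoop, scanMax]
  | cons ch rest ih =>
    intro c mx n hlt
    simp only [mainLoop, scanMax] at *
    set c' := if ch = '0' then c + 1 else 0 with hc'
    have h1 : c' < n := by omega
    have h2 : scanMax rest c' < n := by omega
    by_cases hmx : mx < c'
    · rw [if_pos ⟨hmx, by omega⟩, ih c' c' n h2]; congr 1; omega
    · rw [if_neg (by tauto), if_neg (by omega), ih c' mx n h2]; congr 1; omega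

theorem f_lt : ∀ (l : List Char) (c : Nat), (∃ x ∈ l, x ≠ '0') →
    scanMax l c < c + l.length := by
  have fle : ∀ (l : List Char) (c : Nat), scanMax l c ≤ c + l.length := by
    intro l
    induction l with
    | nil => intro c; simp [scanMax]
    | cons ch rest ih =>
      intro c
      by_cases hch : ch = '0'
      · have := ih (c+1); simp [scanMax, hch] at *; omega
      · have := ih 0; simp [scanMax, hch] at *; omega
  intro l
  induction l with
  | nil => intro c h; simp at h
  | cons ch rest ih =>
    intro c hex
    by_cases hch : ch = '0'
    · have hrest : ∃ x ∈ rest, x ≠ '0' := by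
        rcases hex with ⟨x, hx, hne⟩
        rcases List.mem_cons.mp hx with h | h
        · exact absurd (h ▸ hch) hne
        · exact ⟨x, h, hne⟩
      have hlr : 1 ≤ rest.length := by
        rcases hrest with ⟨x, hx, _⟩; exact List.length_pos_of_mem hx
      have := ih (c+1) hrest
      simp only [scanMax, hch, if_true]
      simp at *; omega
    · have := fle rest 0
      simp only [scanMax, hch, if_false]
      simp at *; omega

theorem leadZ_eq_zero : ∀ l : List Char, l.head? ≠ some '0' → leadZ l = 0 := by
  intro l hl
  cases l with
  | nil => simp [leadZ]
  | cons ch rest => simp at hl; simp [leadZ, hl]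

theorem f_carry0 : ∀ (l : List Char) (c : Nat), l.head? ≠ some '0' →
    scanMax l c = scanMax l 0 := by
  intro l c hl
  cases l with
  | nil => simp [scanMax]
  | cons ch rest => simp at hl; simp [scanMax, hl]

theorem f_carry : ∀ (l : List Char) (c : Nat), l.head? = some '0' →
    scanMax l c = max (c + leadZ l) (scanMax l 0) := by
  intro l
  induction l with
  | nil => intro c h; simp at h
  | cons ch rest ih =>
    intro c hl
    simp at hl; subst hl
    by_cases hr : rest.head? = some '0'
    · have h1 := ih (c+1) hr
      have h2 := ih (0+1) hr
      simp only [scanMax, leadZ, if_true, h1, h2]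
      simp; omega
    · have h1 := f_carry0 rest (c+1) hr
      have h2 := f_carry0 rest (0+1) hr
      have h3 := leadZ_eq_zero rest hr
      simp only [scanMax, leadZ, if_true, h1, h2, h3]
      simp; omega

theorem lead_trail_lt : ∀ l : List Char, (∃ x ∈ l, x ≠ '0') →
    leadZ l + finalC l 0 < l.length := by
  intro l
  induction l with
  | nil => intro h; simp at h
  | cons ch rest ih =>
    intro hex
    by_cases hch : ch = '0'
    · have hrest : ∃ x ∈ rest, x ≠ '0' := by
        rcases hex with ⟨x, hx, hne⟩
        rcases List.mem_cons.mp hx with h | h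
        · exact absurd (h ▸ hch) hne
        · exact ⟨x, h, hne⟩
      have h1 := ih hrest
      have h2 := finalC_kill rest 1 hrest
      simp only [leadZ, finalC, hch, if_true]
      simp at *; omega
    · have := finalC_le rest 0
      simp only [leadZ, finalC, hch, if_false]
      simp at *; omega

theorem finalC_le_f : ∀ (l : List Char) (c : Nat), l ≠ [] → finalC l c ≤ scanMax l c := by
  intro l
  induction l with
  | nil => intro c h; exact absurd rfl h
  | cons ch rest ih =>
    intro c _
    cases rest with
    | nil => simp [finalC, scanMax]
    | cons b bs =>
      have h := ih (if ch = '0' then c + 1 else 0) (by simp)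
      simp only [finalC, scanMax] at h ⊢
      omega

theorem zeroRuns_fold : ∀ (l : List Char) (c m : Nat),
    (zeroRuns l c).foldl max m = max (max m c) (scanMax l c) := by
  intro l
  induction l with
  | nil =>
    intro c m
    by_cases hc : 0 < c
    · simp [zeroRuns, hc, scanMax]
    · have hc0 : c = 0 := by omega
      subst hc0
      simp [zeroRuns, scanMax]
  | cons ch rest ih =>
    intro c m
    by_cases hch : ch = '0'
    · simp only [zeroRuns, scanMax, hch, if_true]
      rw [ih]; omega
    · by_cases hc : 0 < c
      · simp only [zeroRuns, scanMax, hch, if_false, if_pos hc, List.foldl_cons]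
        rw [ih]; omega
      · simp only [zeroRuns, scanMax, hch, if_false, if_neg hc]
        rw [ih]; omega

theorem zeroRuns_head : ∀ (l : List Char) (c : Nat), (0 < c ∨ l.head? = some '0') →
    (zeroRuns l c).headD 0 = c + leadZ l := by
  intro l
  induction l with
  | nil =>
    intro c hc
    simp at hc
    simp [zeroRuns, hc, leadZ]
  | cons ch rest ih =>
    intro c hc
    by_cases hch : ch = '0'
    · simp only [zeroRuns, leadZ, hch, if_true]
      rw [ih (c+1) (Or.inl (by omega))]; omega
    · have hc' : 0 < c := by rcases hc with h | h; exact h; simp at h; exact absurd h hch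
      simp [zeroRuns, leadZ, hch, hc']

theorem zeroRuns_ne_nil : ∀ (l : List Char) (c : Nat), l.getLast? = some '0' →
    zeroRuns l c ≠ [] := by
  intro l
  induction l with
  | nil => intro c h; simp at h
  | cons ch rest ih =>
    intro c hlast
    cases rest with
    | nil =>
      simp at hlast
      simp [zeroRuns, hlast]
    | cons b bs =>
      rw [List.getLast?_cons_cons] at hlast
      by_cases hch : ch = '0'
      · simp only [zeroRuns, hch, if_true]; exact ih _ hlast
      · by_cases hc : 0 < c
        · simp [zeroRuns, hch, hc]
        · simp only [zeroRuns, hch, if_false, if_neg hc]; exact ih _ hlast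

theorem getLastD_default_irrel (xs : List Nat) (a : Nat) (h : xs ≠ []) :
    List.getLastD xs a = List.getLastD xs 0 := by
  cases xs with
  | nil => exact absurd rfl h
  | cons y ys =>
    simp only [List.getLastD_eq_getLast?]
    rw [List.getLast?_eq_some_getLast h]
    rfl

theorem zeroRuns_last : ∀ (l : List Char) (c : Nat), l.getLast? = some '0' →
    (zeroRuns l c).getLastD 0 = finalC l c := by
  intro l
  induction l with
  | nil => intro c h; simp at h
  | cons ch rest ih =>
    intro c hlast
    cases rest with
    | nil =>
      simp at hlast
      simp [zeroRuns, hlast, finalC]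
    | cons b bs =>
      rw [List.getLast?_cons_cons] at hlast
      by_cases hch : ch = '0'
      · simp only [zeroRuns, finalC, hch, if_true]; exact ih _ hlast
      · by_cases hc : 0 < c
        · have hne := zeroRuns_ne_nil (b :: bs) 0 hlast
          have h0 : zeroRuns (ch :: b :: bs) c = c :: zeroRuns (b :: bs) 0 := by
            simp [zeroRuns, hch, hc]
          have hf : finalC (ch :: b :: bs) c = finalC (b :: bs) 0 := by simp [finalC, hch]
          rw [h0, hf, List.getLastD_cons, getLastD_default_irrel _ c hne]
          exact ih 0 hlast
        · simp only [zeroRuns, finalC, hch, if_false, if_neg hc]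
          exact ih _ hlast

-- ===== VERDICT (by name: the statement is the Claim_ definition above) =====
theorem bcount_spec : Claim_equal_bcount := by
  intro s _
  unfold Spec_bcount
  show bcount s = bcount_alt s
  simp only [bcount, bcount_alt]
  generalize s.toList = l
  by_cases hnil : l = []
  · subst hnil
    simp [trailLoop, mainLoop, zeroRuns]
  · by_cases hall : ∀ x ∈ l, x = '0'
    · -- all zeros: both return -1
      have hzr := trailLoop_all0 l.reverse 0 l.length
        (fun x hx => hall x (List.mem_reverse.mp hx)) (by simp [hnil]) (by simp)
      rw [hzr, if_pos (⟨hnil, hall⟩ : l ≠ [] ∧ ∀ x ∈ l, x = '0')]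
    · -- there is a non-'0' character
      have hex : ∃ x ∈ l, x ≠ '0' := by
        by_contra h
        exact hall (fun x hx => by by_contra hne; exact h ⟨x, hx, hne⟩)
      have hexr : ∃ x ∈ l.reverse, x ≠ '0' := by
        rcases hex with ⟨x, hx, hne⟩; exact ⟨x, List.mem_reverse.mpr hx, hne⟩
      have ht := trailLoop_some l.reverse 0 l.length hexr (by simp)
      rw [leadZ_reverse] at ht
      simp only [Nat.zero_add] at ht
      have hguard : ¬ (l ≠ [] ∧ (∀ x ∈ l, x = '0')) := by tauto
      have hf0 : scanMax l 0 < l.length := by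
        have := f_lt l 0 hex; omega
      have hfold : (zeroRuns l 0).foldl max 0 = scanMax l 0 := by
        rw [zeroRuns_fold]; omega
      set t := finalC l 0 with hT
      by_cases hlast : l.getLast? = some '0'
      · have htle : t ≤ scanMax l 0 := by
          have := finalC_le_f l 0 hnil; omega
        by_cases hhd : l.head? = some '0'
        · -- wrap case
          have hcarry := f_carry l t hhd
          have hltw := lead_trail_lt l hex
          have hmain := main_f l t t l.length (by omega)
          have hw : l.head? = some '0' ∧ l.getLast? = some '0' := ⟨hhd, hlast⟩
          rw [ht]
          simp only [hmain, hguard, if_false, if_pos hw, hfold,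
            zeroRuns_head l 0 (Or.inr hhd), zeroRuns_last l 0 hlast, ← hT, Nat.zero_add]
          rw [hcarry]
          congr 1
          omega
        · -- last is '0', head is not: no wrap, t ≤ best
          have hcarry := f_carry0 l t hhd
          have hmain := main_f l t t l.length (by omega)
          rw [ht]
          have hw : ¬ (l.head? = some '0' ∧ l.getLast? = some '0') := by tauto
          simp only [hmain, hguard, if_false, hw, hfold, hcarry]
          congr 1
          omega
      · -- last is not '0': t = 0
        have ht0 : t = 0 := finalC_last_ne l 0 hnil hlast
        have hmain := main_f l t t l.length (by rw [ht0]; omega)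
        rw [ht]
        have hw : ¬ (l.head? = some '0' ∧ l.getLast? = some '0') := by tauto
        rw [ht0] at hmain ⊢
        simp only [hmain, hguard, if_false, hw, hfold, Nat.zero_max]
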